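-- pv_equiv track=rewrite | github.com/YaRkyungmin/algorithm-practice | make new id.py | solution
-- ===== SOURCE A (Python) =====
-- def solution(new_id):
--     answer = ''
--     new_id = new_id.lower() # step1
--     for word in new_id: #step2
--         if word.isalnum() or word in '-_.':
--             answer += word
--     while '..' in answer: #step3
--         answer = answer.replace('..','.')
--     answer = answer[1:] if answer[0]=='.' and len(answer) > 1 else answer #step4
--     answer = answer[:-1] if answer[-1]=='.' else answer
--     answer = 'a' if answer==str() else answer #step5
--     if len(answer) > 15: #step6
--         answer = answer[:15]
--         answer = answer[:-1] if answer[-1]=='.' else answer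
--     while len(answer) < 3: #step7
--         answer= answer+answer[-1]
--     return answer
-- ===== SOURCE B (Python) =====
-- def solution(new_id):
--     # One pass: filtering and dot-run collapsing merged; padding by a closed form.
--     answer = ''
--     for ch in new_id.lower():
--         if (ch.isalnum() or ch in '-_.') and not (ch == '.' and answer.endswith('.')):
--             answer += ch
--     if answer[0] == '.' and len(answer) > 1:
--         answer = answer[1:]
--     if answer[-1] == '.':
--         answer = answer[:-1]
--     if answer == '':
--         answer = 'a'
--     if len(answer) > 15:
--         answer = answer[:15]
--         if answer[-1] == '.':
--             answer = answer[:-1]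
--     return answer + answer[-1] * (3 - len(answer))
-- ===== Notes on version B (the rewrite author's own statement) =====
-- stated objective: alternative
-- what changed: The separate filter loop plus the repeated whole-string replace loop that collapses runs of dots are merged into one left-to-right pass that appends a character only if it is kept and is not a dot immediately following an appended dot; the final padding while-loop is replaced by a closed-form repetition of the last character.
import Mathlib
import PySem

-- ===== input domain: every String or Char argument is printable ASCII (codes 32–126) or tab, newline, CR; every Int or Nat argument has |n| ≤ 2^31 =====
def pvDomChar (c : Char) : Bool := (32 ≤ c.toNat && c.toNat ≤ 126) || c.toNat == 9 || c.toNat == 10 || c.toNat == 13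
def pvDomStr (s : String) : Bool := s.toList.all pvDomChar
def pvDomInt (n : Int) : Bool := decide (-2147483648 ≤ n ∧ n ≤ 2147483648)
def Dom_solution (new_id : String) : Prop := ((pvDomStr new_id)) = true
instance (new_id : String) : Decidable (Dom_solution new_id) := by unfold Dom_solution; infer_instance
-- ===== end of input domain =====

-- B merges A's filter loop and the repeated '..'→'.' replace rescans into one pass that skips a
-- dot following an appended dot, and pads with a closed form instead of A's while loop (objective: alternative).

-- ===== PORT A =====
-- step2 condition: word.isalnum() or word in '-_.'
def pvKeepA (c : Char) : Bool := PySem.Chars.isalnum c || PySem.Chars.isIn [c] ['-', '_', '.']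

-- step3: while '..' in answer: answer = answer.replace('..','.')  (fuel = current length bounds the iterations)
def pvStep3 : Nat → List Char → List Char
  | 0, ans => ans
  | fuel + 1, ans =>
    if PySem.Chars.isIn ['.', '.'] ans then pvStep3 fuel (PySem.Chars.replace ans ['.', '.'] ['.']) else ans

-- step7: while len(answer) < 3: answer = answer + answer[-1]  (at most 3 iterations are ever needed)
def pvStep7 : Nat → List Char → List Char
  | 0, ans => ans
  | fuel + 1, ans =>
    if ans.length < 3 then
      match PySem.List.pyGet? ans (-1) with
      | none => ans        -- unreachable: ans is nonempty whenever the loop body runs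
      | some c => pvStep7 fuel (ans ++ [c])
    else ans

-- steps 4–7 of A; 'none => []' marks the IndexError of answer[0] / answer[-1] (excluded by Pre_)
def pvTailA (ans0 : List Char) : List Char :=
  match PySem.List.pyGet? ans0 0 with
  | none => []             -- IndexError: answer[0] on empty answer
  | some c0 =>
    let a1 := if c0 == '.' && decide (ans0.length > 1) then PySem.List.slice ans0 (some 1) none else ans0
    match PySem.List.pyGet? a1 (-1) with
    | none => []           -- IndexError: answer[-1] on empty answer (unreachable here)
    | some cl =>
      let a2 := if cl == '.' then PySem.List.slice a1 none (some (-1)) else a1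
      let a3 := if a2 = [] then ['a'] else a2                                 -- step5
      let a4 := if a3.length > 15 then                                        -- step6
          let t := PySem.List.slice a3 none (some 15)
          match PySem.List.pyGet? t (-1) with
          | none => t
          | some c => if c == '.' then PySem.List.slice t none (some (-1)) else t
        else a3
      pvStep7 3 a4                                                            -- step7

def solution (new_id : String) : String :=
  let lowered := (PySem.Str.lower new_id).toList
  let answer := lowered.foldl (fun acc c => if pvKeepA c then acc ++ [c] else acc) []  -- step2
  String.ofList (pvTailA (pvStep3 answer.length answer))

-- ===== PORT B =====
def pvKeepB (c : Char) : Bool := PySem.Chars.isalnum c || c == '-' || c == '_' || c == '.'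

-- steps 4–7 of B; 'none => []' marks the IndexError of answer[0] / answer[-1] (excluded by Pre_)
def pvTailB (ans0 : List Char) : List Char :=
  match ans0.head? with
  | none => []             -- IndexError: answer[0] on empty answer
  | some c0 =>
    let a1 := if c0 = '.' ∧ 1 < ans0.length then ans0.drop 1 else ans0
    match a1.getLast? with
    | none => []           -- IndexError: answer[-1] on empty answer (unreachable here)
    | some cl =>
      let a2 := if cl = '.' then a1.dropLast else a1
      let a3 := if a2.isEmpty then ['a'] else a2
      let a4 := if 15 < a3.length then
          let t := a3.take 15
          match t.getLast? with
          | none => t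
          | some c => if c = '.' then t.dropLast else t
        else a3
      match a4.getLast? with
      | none => a4
      | some c => a4 ++ List.replicate (3 - a4.length) c   -- answer + answer[-1] * (3 - len(answer))

def solution_alt (new_id : String) : String :=
  let answer := (PySem.Str.lower new_id).toList.foldl
    (fun acc c =>
      if pvKeepB c && !(c == '.' && PySem.Chars.endswith acc ['.']) then acc ++ [c] else acc) []
  String.ofList (pvTailB answer)

-- ===== PRECONDITION & SPEC =====
-- Pre_ excludes exactly the inputs with no kept character (no alphanumeric and none of '-', '_', '.'),
-- on which A raises IndexError at answer[0] (B raises there too).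
def pvPreKeep (c : Char) : Bool :=
  PySem.Chars.isalnum c || c = '-' || c = '_' || c = '.'
def Pre_solution (new_id : String) : Prop :=
  new_id.toList.any (fun c => pvPreKeep (PySem.Chars.lowerChar c)) = true
instance (new_id : String) : Decidable (Pre_solution new_id) := by unfold Pre_solution; infer_instance
def pvWitness_solution : String := "...New-ID!"
def Spec_solution (new_id : String) (out : String) : Prop := out = solution_alt new_id
instance (new_id : String) (out : String) : Decidable (Spec_solution new_id out) := by unfold Spec_solution; infer_instance

-- ===== CLAIM (what is proved, stated in full; the proofs are below) =====
def Claim_equal_solution : Prop := ∀ (new_id : String), Dom_solution new_id → Pre_solution new_id → Spec_solution new_id (solution new_id)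

-- ===== LEMMAS AND PROOFS =====

-- The canonical collapse: pdot = "the previously emitted character is '.'"; a dot is dropped after a dot.
def pvSz : Bool → List Char → List Char
  | _, [] => []
  | pdot, c :: t => if c == '.' && pdot then pvSz pdot t else c :: pvSz (c == '.') t

-- One replace('..','.') pass, in recursive form.
def pvR : List Char → List Char
  | [] => []
  | [c] => [c]
  | a :: b :: t => if a = '.' ∧ b = '.' then '.' :: pvR t else a :: pvR (b :: t)

lemma pvR_go (fuel : Nat) (l acc : List Char) (h : l.length ≤ fuel) :
    PySem.Chars.replace.go ['.', '.'] ['.'] fuel l acc = acc.reverse ++ pvR l := by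
  induction fuel generalizing l acc with
  | zero =>
    have : l = [] := List.length_eq_zero_iff.mp (by omega)
    subst this; simp [PySem.Chars.replace.go, pvR]
  | succ fuel ih =>
    match l with
    | [] => simp [PySem.Chars.replace.go, pvR]
    | c :: t =>
      rw [PySem.Chars.replace.go]
      by_cases hp : List.isPrefixOf ['.', '.'] (c :: t) = true
      · rw [if_pos hp]
        have hsh : ∃ u, c :: t = '.' :: '.' :: u := by
          rw [List.isPrefixOf_iff_prefix] at hp
          obtain ⟨u, hu⟩ := hp
          exact ⟨u, by simpa using hu.symm⟩
        obtain ⟨u, hu⟩ := hsh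
        cases hu
        have : u.length ≤ fuel := by simp at h; omega
        rw [show List.drop (['.', '.'] : List Char).length ('.' :: '.' :: u) = u from rfl,
          ih u _ this]
        simp [pvR]
      · rw [if_neg hp]
        have ht : t.length ≤ fuel := by simp at h; omega
        rw [ih t _ ht]
        have : pvR (c :: t) = c :: pvR t := by
          match t with
          | [] => rfl
          | b :: u =>
            rw [pvR]
            rw [if_neg]
            intro ⟨h1, h2⟩
            subst h1; subst h2
            simp [List.isPrefixOf] at hp
        rw [this]; simp

lemma pvR_eq (s : List Char) : PySem.Chars.replace s ['.', '.'] ['.'] = pvR s := by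
  rw [PySem.Chars.replace]
  simp only [List.isEmpty_cons, if_false, Bool.false_eq_true]
  simpa using pvR_go s.length s [] (le_refl _)

lemma pvSz_dot_cons (pdot : Bool) (t : List Char) :
    pvSz pdot ('.' :: t) = if pdot then pvSz true t else '.' :: pvSz true t := by
  rw [pvSz]
  cases pdot <;> simp

lemma pvSz_pvR (s : List Char) : ∀ pdot, pvSz pdot (pvR s) = pvSz pdot s := by
  induction s using pvR.induct with
  | case1 => intro pdot; rfl
  | case2 c => intro pdot; rfl
  | case3 a b t hab ih =>
    intro pdot
    obtain ⟨ha, hb⟩ := hab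
    subst ha; subst hb
    rw [pvR, if_pos ⟨rfl, rfl⟩]
    rw [pvSz_dot_cons, pvSz_dot_cons, pvSz_dot_cons, ih true]
    cases pdot <;> simp
  | case4 a b t hab ih =>
    intro pdot
    rw [pvR, if_neg hab]
    rw [pvSz, pvSz]
    by_cases hc : (a == '.' && pdot) = true
    · rw [if_pos hc, if_pos hc, ih]
    · rw [if_neg hc, if_neg hc, ih]

lemma pvSz_id (s : List Char) : ∀ pdot, ¬ (['.', '.'] <:+: s) →
    (pdot = true → s.head? ≠ some '.') → pvSz pdot s = s := by
  induction s with
  | nil => intro pdot _ _; rfl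
  | cons c t ih =>
    intro pdot hinf hhd
    rw [pvSz, if_neg]
    · have h1 : ¬ (['.', '.'] <:+: t) := fun h => hinf (h.trans (List.suffix_cons c t).isInfix)
      have h2 : (c == '.') = true → t.head? ≠ some '.' := by
        intro hc ht
        apply hinf
        have hc' : c = '.' := by simpa using hc
        obtain ⟨u, hu⟩ : ∃ u, t = '.' :: u := by
          cases t with
          | nil => simp at ht
          | cons x u => exact ⟨u, by simp at ht; simp [ht]⟩
        subst hc'; subst hu
        exact ⟨[], u, rfl⟩
      rw [ih (c == '.') h1 h2]
    · intro hcp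
      simp only [Bool.and_eq_true, beq_iff_eq] at hcp
      exact hhd hcp.2 (by simp [hcp.1])

lemma pvR_length_le (s : List Char) : (pvR s).length ≤ s.length := by
  induction s using pvR.induct with
  | case1 => simp [pvR]
  | case2 c => simp [pvR]
  | case3 a b t hab ih =>
    rw [pvR, if_pos hab]; simp only [List.length_cons]; omega
  | case4 a b t hab ih =>
    rw [pvR, if_neg hab]; simp only [List.length_cons] at ih ⊢; omega

lemma pvR_length_lt (s : List Char) (h : ['.', '.'] <:+: s) : (pvR s).length < s.length := by
  induction s using pvR.induct with
  | case1 => simp at h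
  | case2 c =>
    have := h.length_le
    simp only [List.length_cons, List.length_nil] at this
    omega
  | case3 a b t hab ih =>
    rw [pvR, if_pos hab]
    have := pvR_length_le t
    simp only [List.length_cons]; omega
  | case4 a b t hab ih =>
    rw [pvR, if_neg hab]
    have ht : ['.', '.'] <:+: b :: t := by
      rcases List.infix_cons_iff.mp h with hpre | hinf
      · exfalso
        obtain ⟨u, hu⟩ := hpre
        apply hab
        have := hu.symm
        simp at this
        exact ⟨this.1, this.2.1⟩
      · exact hinf
    have := ih ht
    simp only [List.length_cons] at this ⊢; omega

lemma pvStep3_eq (n : Nat) : ∀ (s : List Char) (fuel : Nat), s.length ≤ n → s.length ≤ fuel →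
    pvStep3 fuel s = pvSz false s := by
  induction n with
  | zero =>
    intro s fuel h _
    have : s = [] := List.length_eq_zero_iff.mp (by omega)
    subst this
    cases fuel with
    | zero => rfl
    | succ fuel => rw [pvStep3, if_neg (by decide)]; rfl
  | succ n ih =>
    intro s fuel hn hf
    by_cases hin : PySem.Chars.isIn ['.', '.'] s = true
    · have hinf := (PySem.Chars.isIn_iff_infix _ _).mp hin
      have h2 : 2 ≤ s.length := by simpa using hinf.length_le
      cases fuel with
      | zero => omega
      | succ fuel =>
        rw [pvStep3, if_pos hin, pvR_eq]
        have hlt := pvR_length_lt s hinf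
        rw [ih (pvR s) fuel (by omega) (by omega), pvSz_pvR]
    · have hninf := (PySem.Chars.isIn_eq_false_iff _ _).mp (by simpa using hin)
      have hid := pvSz_id s false hninf (by simp)
      cases fuel with
      | zero => rw [pvStep3, hid]
      | succ fuel => rw [pvStep3, if_neg hin, hid]

-- ---- B's loop ----

def pvFB : List Char → Char → List Char := fun acc c =>
  if pvKeepB c && !(c == '.' && PySem.Chars.endswith acc ['.']) then acc ++ [c] else acc

-- filtering and collapsing in one pass, with the prev-dot flag made explicit
def pvSqf : Bool → List Char → List Char
  | _, [] => []
  | pdot, c :: t => if pvKeepB c && !(c == '.' && pdot) then c :: pvSqf (c == '.') t else pvSqf pdot t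

lemma pvEndswith_append (acc : List Char) (c : Char) :
    PySem.Chars.endswith (acc ++ [c]) ['.'] = (c == '.') := by
  rw [PySem.Chars.endswith, Bool.eq_iff_iff, List.isSuffixOf_iff_suffix, beq_iff_eq]
  constructor
  · intro ⟨u, hu⟩
    have := List.append_inj' hu rfl
    simpa using (this.2).symm
  · rintro rfl
    exact List.suffix_append acc ['.']

lemma pvFoldB (l : List Char) : ∀ (acc : List Char),
    l.foldl pvFB acc = acc ++ pvSqf (PySem.Chars.endswith acc ['.']) l := by
  induction l with
  | nil => intro acc; simp [pvSqf]
  | cons c t ih =>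
    intro acc
    rw [List.foldl_cons, pvSqf]
    show t.foldl pvFB (pvFB acc c) = _
    rw [pvFB]
    by_cases hk : (pvKeepB c && !(c == '.' && PySem.Chars.endswith acc ['.'])) = true
    · rw [if_pos hk, if_pos hk, ih, pvEndswith_append]
      simp
    · rw [if_neg hk, if_neg hk, ih]

lemma pvKeepB_eq_keepA (c : Char) : pvKeepB c = pvKeepA c := by
  rw [pvKeepB, pvKeepA]
  have : PySem.Chars.isIn [c] ['-', '_', '.'] = (c == '-' || c == '_' || c == '.') := by
    rw [Bool.eq_iff_iff, PySem.Chars.isIn_iff_infix]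
    constructor
    · intro h
      have hm : c ∈ (['-', '_', '.'] : List Char) := h.subset (by simp)
      fin_cases hm <;> rfl
    · intro h
      simp only [Bool.or_eq_true, beq_iff_eq] at h
      rcases h with (h | h) | h
      · exact ⟨[], ['_', '.'], by simp [h]⟩
      · exact ⟨['-'], ['.'], by simp [h]⟩
      · exact ⟨['-', '_'], [], by simp [h]⟩
  rw [this]
  cases PySem.Chars.isalnum c <;> simp

lemma pvSqf_sz (l : List Char) : ∀ pdot, pvSqf pdot l = pvSz pdot (l.filter pvKeepA) := by
  induction l with
  | nil => intro pdot; rfl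
  | cons c t ih =>
    intro pdot
    rw [pvSqf, List.filter_cons]
    by_cases hk : pvKeepA c = true
    · rw [if_pos hk, pvSz]
      rw [pvKeepB_eq_keepA, hk, Bool.true_and]
      by_cases hd : (c == '.' && pdot) = true
      · rw [hd]
        simp only [Bool.not_true]
        rw [if_neg (by simp), if_pos trivial]
        exact ih pdot
      · rw [Bool.not_eq_true] at hd
        rw [hd]
        simp only [Bool.not_false]
        rw [if_pos trivial, if_neg (by simp)]
        rw [ih]
    · rw [Bool.not_eq_true] at hk
      rw [hk, if_neg (by simp [pvKeepB_eq_keepA, hk])]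
      simp only [Bool.false_eq_true, if_false]
      exact ih pdot

-- ---- tails agree ----

lemma pvStep7_replicate (z : List Char) (c : Char) (h : z.getLast? = some c) :
    pvStep7 3 z = z ++ List.replicate (3 - z.length) c := by
  have hz : z ≠ [] := by intro hz; subst hz; simp at h
  match z with
  | [a] =>
    simp at h; subst h
    simp [pvStep7, PySem.List.pyGet?, PySem.List.pyIdx?]
  | [a, b] =>
    simp at h; subst h
    simp [pvStep7, PySem.List.pyGet?, PySem.List.pyIdx?]
  | a :: b :: d :: t =>
    have h3 : ¬ ((a :: b :: d :: t).length < 3) := by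
      simp only [List.length_cons]; omega
    rw [pvStep7, if_neg h3]
    have : 3 - (a :: b :: d :: t).length = 0 := by
      simp only [List.length_cons]; omega
    rw [this]; simp

lemma pvSlice1 (xs : List Char) : PySem.List.slice xs (some 1) none = xs.drop 1 := by
  have := PySem.List.slice_from xs (show (0:Int) ≤ 1 by norm_num)
  simpa using this

lemma pvSlice15 (xs : List Char) : PySem.List.slice xs none (some 15) = xs.take 15 := by
  have := PySem.List.slice_to xs (show (0:Int) ≤ 15 by norm_num)
  simpa using this

lemma pvStep7_pad (l : List Char) : pvStep7 3 l =
    (match l.getLast? with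
     | none => l
     | some c => l ++ List.replicate (3 - l.length) c) := by
  cases h : l.getLast? with
  | none => rw [List.getLast?_eq_none_iff.mp h]; rfl
  | some c => exact pvStep7_replicate _ _ h

lemma pvTail_eq (z : List Char) : pvTailA z = pvTailB z := by
  rw [pvTailA, pvTailB]
  rw [show (0:Int) = ((0:Nat):Int) from rfl, PySem.List.pyGet?_natCast, ← List.head?_eq_getElem?]
  cases hh : z.head? with
  | none => rfl
  | some c0 =>
    simp only [pvSlice1, pvSlice15, PySem.List.pyGet?_neg_one, PySem.List.slice_to_neg_one,
      Bool.and_eq_true, beq_iff_eq, decide_eq_true_eq, gt_iff_lt, List.isEmpty_iff]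
    cases hl : (if c0 = '.' ∧ 1 < z.length then List.drop 1 z else z).getLast? with
    | none => rfl
    | some cl =>
      exact pvStep7_pad _

lemma pvFoldlA (l acc : List Char) :
    List.foldl (fun acc c => if pvKeepA c then acc ++ [c] else acc) acc l = acc ++ l.filter pvKeepA := by
  simpa using PySem.List.foldl_append_if pvKeepA (fun x => x) l acc

-- ===== VERDICT (by name: the statement is the Claim_ definition above) =====
theorem solution_spec : Claim_equal_solution := by
  intro new_id _ _
  show solution new_id = solution_alt new_id
  rw [solution, solution_alt]
  rw [pvFoldlA]
  simp only [List.nil_append]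
  rw [pvStep3_eq (((PySem.Str.lower new_id).toList.filter pvKeepA).length) _ _ (le_refl _) (le_refl _)]
  rw [show (fun acc c =>
        if pvKeepB c && !(c == '.' && PySem.Chars.endswith acc ['.']) then acc ++ [c] else acc) = pvFB
      from rfl]
  rw [pvFoldB]
  simp only [List.nil_append]
  rw [show PySem.Chars.endswith [] ['.'] = false from rfl, pvSqf_sz]
  rw [pvTail_eq]
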